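-- pv_equiv track=rewrite | github.com/aakash2764/Ai-risk-prediction | train.py | create_clinical_explanations
-- ===== SOURCE A (Python) =====
-- from typing import Dict, List, Tuple, Any
--
-- def create_clinical_explanations(feature_names: List[str]) -> Dict[str, str]:
--     """Create clinician-friendly explanations for features"""
--
--     clinical_explanations = {}
--
--     for feature in feature_names:
--         # Parse feature name to create clinical explanation
--         if 'SystolicBP' in feature:
--             clinical_explanations[feature] = "Blood pressure (systolic) - higher values indicate hypertension risk"
--         elif 'DiastolicBP' in feature:
--             clinical_explanations[feature] = "Blood pressure (diastolic) - elevated values suggest cardiovascular stress"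
--         elif 'HeartRate' in feature:
--             clinical_explanations[feature] = "Heart rate - abnormal values may indicate cardiac issues"
--         elif 'Glucose' in feature:
--             clinical_explanations[feature] = "Blood glucose - elevated levels indicate diabetes risk"
--         elif 'Creatinine' in feature:
--             clinical_explanations[feature] = "Kidney function marker - higher values suggest kidney problems"
--         elif 'ALT' in feature or 'AST' in feature:
--             clinical_explanations[feature] = "Liver enzyme - elevated levels indicate liver damage"
--         elif 'MedicationAdherence' in feature:
--             clinical_explanations[feature] = "Medication compliance - lower values indicate poor adherence"
--         elif 'WeightBMI' in feature:
--             clinical_explanations[feature] = "Body mass index - higher values indicate obesity"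
--         elif 'O2Sat' in feature:
--             clinical_explanations[feature] = "Oxygen saturation - lower values indicate respiratory issues"
--         elif '_slope_' in feature:
--             clinical_explanations[feature] = f"Trend in {feature.split('_')[0]} - positive slope indicates increasing values"
--         elif '_delta_' in feature:
--             clinical_explanations[feature] = f"Change in {feature.split('_')[0]} over time"
--         elif 'risk' in feature.lower():
--             clinical_explanations[feature] = "Combined risk factor based on multiple clinical indicators"
--         else:
--             # Generic explanation
--             base_param = feature.split('_')[0] if '_' in feature else feature
--             clinical_explanations[feature] = f"Clinical parameter: {base_param}"
--
--     return clinical_explanations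
-- ===== SOURCE B (Python) =====
-- def create_clinical_explanations(feature_names):
--     """Painter's algorithm: give every feature the generic explanation first,
--     then sweep the rules from lowest to highest priority, overwriting matching
--     entries, so the highest-priority matching rule ends up winning."""
--     out = {}
--     for f in feature_names:
--         out[f] = f"Clinical parameter: {f.split('_')[0] if '_' in f else f}"
--     for f in feature_names:
--         if 'risk' in f.lower():
--             out[f] = "Combined risk factor based on multiple clinical indicators"
--     for f in feature_names:
--         if '_delta_' in f:
--             out[f] = f"Change in {f.split('_')[0]} over time"
--     for f in feature_names:
--         if '_slope_' in f:
--             out[f] = f"Trend in {f.split('_')[0]} - positive slope indicates increasing values"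
--     for subs, text in [
--         (('O2Sat',), "Oxygen saturation - lower values indicate respiratory issues"),
--         (('WeightBMI',), "Body mass index - higher values indicate obesity"),
--         (('MedicationAdherence',), "Medication compliance - lower values indicate poor adherence"),
--         (('ALT', 'AST'), "Liver enzyme - elevated levels indicate liver damage"),
--         (('Creatinine',), "Kidney function marker - higher values suggest kidney problems"),
--         (('Glucose',), "Blood glucose - elevated levels indicate diabetes risk"),
--         (('HeartRate',), "Heart rate - abnormal values may indicate cardiac issues"),
--         (('DiastolicBP',), "Blood pressure (diastolic) - elevated values suggest cardiovascular stress"),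
--         (('SystolicBP',), "Blood pressure (systolic) - higher values indicate hypertension risk"),
--     ]:
--         for f in feature_names:
--             if any(s in f for s in subs):
--                 out[f] = text
--     return out
-- ===== Notes on version B (the rewrite author's own statement) =====
-- stated objective: alternative
-- what changed: Replaces A's per-feature first-match elif cascade with a painter's algorithm: every feature first gets the generic explanation, then the rules are swept rule-major from lowest to highest priority, overwriting matching entries so the highest-priority matching rule wins.
import Mathlib
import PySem

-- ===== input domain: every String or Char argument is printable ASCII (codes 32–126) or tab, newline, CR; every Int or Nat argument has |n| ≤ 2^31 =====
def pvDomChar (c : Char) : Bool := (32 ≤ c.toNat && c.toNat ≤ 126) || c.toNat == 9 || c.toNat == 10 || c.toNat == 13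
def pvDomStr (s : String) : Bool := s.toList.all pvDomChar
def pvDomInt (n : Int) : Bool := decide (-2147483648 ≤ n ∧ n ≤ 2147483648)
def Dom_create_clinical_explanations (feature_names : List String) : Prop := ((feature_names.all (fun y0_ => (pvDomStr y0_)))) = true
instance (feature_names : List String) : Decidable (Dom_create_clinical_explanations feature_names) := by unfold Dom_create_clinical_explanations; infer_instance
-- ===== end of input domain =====

-- B replaces A's per-feature first-match elif cascade with a painter's algorithm: every feature
-- first receives the generic explanation, then the rules are swept rule-major from lowest to
-- highest priority, overwriting matching entries (alternative decomposition, no speed claim).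

-- shared helper: Python's  feature.split('_')[0]  (split always returns a non-empty list,
-- so index 0 never raises — the default "" is unreachable)
def pvBaseParam (f : String) : String :=
  PySem.List.pyGetD ((PySem.Str.split? f "_").getD []) 0 ""

-- ===== PORT A =====
-- the body of A's for-loop: the if/elif cascade choosing the explanation for one feature
def pvExplainA (feature : String) : String :=
  if PySem.Str.isIn "SystolicBP" feature then
    "Blood pressure (systolic) - higher values indicate hypertension risk"
  else if PySem.Str.isIn "DiastolicBP" feature then
    "Blood pressure (diastolic) - elevated values suggest cardiovascular stress"
  else if PySem.Str.isIn "HeartRate" feature then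
    "Heart rate - abnormal values may indicate cardiac issues"
  else if PySem.Str.isIn "Glucose" feature then
    "Blood glucose - elevated levels indicate diabetes risk"
  else if PySem.Str.isIn "Creatinine" feature then
    "Kidney function marker - higher values suggest kidney problems"
  else if PySem.Str.isIn "ALT" feature || PySem.Str.isIn "AST" feature then
    "Liver enzyme - elevated levels indicate liver damage"
  else if PySem.Str.isIn "MedicationAdherence" feature then
    "Medication compliance - lower values indicate poor adherence"
  else if PySem.Str.isIn "WeightBMI" feature then
    "Body mass index - higher values indicate obesity"
  else if PySem.Str.isIn "O2Sat" feature then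
    "Oxygen saturation - lower values indicate respiratory issues"
  else if PySem.Str.isIn "_slope_" feature then
    "Trend in " ++ pvBaseParam feature ++ " - positive slope indicates increasing values"
  else if PySem.Str.isIn "_delta_" feature then
    "Change in " ++ pvBaseParam feature ++ " over time"
  else if PySem.Str.isIn "risk" (PySem.Str.lower feature) then
    "Combined risk factor based on multiple clinical indicators"
  else
    "Clinical parameter: " ++
      (if PySem.Str.isIn "_" feature then pvBaseParam feature else feature)

def create_clinical_explanations (feature_names : List String) : List (String × String) :=
  (feature_names.foldl (fun d feature => d.insert feature (pvExplainA feature))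
    (PySem.Dict.empty : PySem.Dict String String)).items

-- ===== PORT B =====
-- one overwrite sweep: 'for f in feature_names: if c(f): out[f] = v(f)'
def pvPass (c : String → Bool) (v : String → String) (fs : List String)
    (d : PySem.Dict String String) : PySem.Dict String String :=
  fs.foldl (fun d f => if c f then d.insert f (v f) else d) d

-- the static rules, listed from LOWEST to HIGHEST priority (painter's order)
def pvStaticRules : List (List String × String) :=
  [ (["O2Sat"], "Oxygen saturation - lower values indicate respiratory issues"),
    (["WeightBMI"], "Body mass index - higher values indicate obesity"),
    (["MedicationAdherence"], "Medication compliance - lower values indicate poor adherence"),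
    (["ALT", "AST"], "Liver enzyme - elevated levels indicate liver damage"),
    (["Creatinine"], "Kidney function marker - higher values suggest kidney problems"),
    (["Glucose"], "Blood glucose - elevated levels indicate diabetes risk"),
    (["HeartRate"], "Heart rate - abnormal values may indicate cardiac issues"),
    (["DiastolicBP"], "Blood pressure (diastolic) - elevated values suggest cardiovascular stress"),
    (["SystolicBP"], "Blood pressure (systolic) - higher values indicate hypertension risk") ]

def create_clinical_explanations_alt (feature_names : List String) : List (String × String) :=
  -- generic base coat
  let d0 := feature_names.foldl
    (fun d f => d.insert f ("Clinical parameter: " ++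
      (if PySem.Str.isIn "_" f then pvBaseParam f else f)))
    (PySem.Dict.empty : PySem.Dict String String)
  -- dynamic rules, lowest priority first
  let d1 := pvPass (fun f => PySem.Str.isIn "risk" (PySem.Str.lower f))
    (fun _ => "Combined risk factor based on multiple clinical indicators") feature_names d0
  let d2 := pvPass (fun f => PySem.Str.isIn "_delta_" f)
    (fun f => "Change in " ++ pvBaseParam f ++ " over time") feature_names d1
  let d3 := pvPass (fun f => PySem.Str.isIn "_slope_" f)
    (fun f => "Trend in " ++ pvBaseParam f ++ " - positive slope indicates increasing values")
    feature_names d2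
  -- static rules, still lowest priority first; the last sweep (SystolicBP) wins
  let d4 := pvStaticRules.foldl
    (fun d r => pvPass (fun f => r.1.any (fun s => PySem.Str.isIn s f)) (fun _ => r.2)
      feature_names d) d3
  d4.items

-- ===== PRECONDITION & SPEC =====
def Spec_create_clinical_explanations (feature_names : List String) (out : List (String × String)) : Prop := out = create_clinical_explanations_alt feature_names
instance (feature_names : List String) (out : List (String × String)) : Decidable (Spec_create_clinical_explanations feature_names out) := by unfold Spec_create_clinical_explanations; infer_instance

-- ===== CLAIM (what is proved, stated in full; the proofs are below) =====
def Claim_equal_create_clinical_explanations : Prop := ∀ (feature_names : List String), Dom_create_clinical_explanations feature_names → Spec_create_clinical_explanations feature_names (create_clinical_explanations feature_names)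

-- ===== LEMMAS AND PROOFS =====

-- a fold of inserts whose value depends only on the key
def pvInsFold (g : String → String) (fs : List String) (d : PySem.Dict String String) :
    PySem.Dict String String :=
  fs.foldl (fun d f => d.insert f (g f)) d

theorem pv_keys_insFold_congr (g₁ g₂ : String → String) (fs : List String)
    (d₁ d₂ : PySem.Dict String String) (h : d₁.keys = d₂.keys) :
    (pvInsFold g₁ fs d₁).keys = (pvInsFold g₂ fs d₂).keys := by
  induction fs generalizing d₁ d₂ with
  | nil => exact h
  | cons f rest ih =>
    apply ih
    by_cases hk : f ∈ d₁.keys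
    · rw [PySem.Dict.keys_insert_of_contains _ _ (by simp [PySem.Dict.contains_eq_decide_mem_keys, hk]),
        PySem.Dict.keys_insert_of_contains _ _ (by simp [PySem.Dict.contains_eq_decide_mem_keys, h ▸ hk]), h]
    · rw [PySem.Dict.keys_insert_of_not_contains _ _ (by simp [PySem.Dict.contains_eq_decide_mem_keys, hk]),
        PySem.Dict.keys_insert_of_not_contains _ _ (by simp [PySem.Dict.contains_eq_decide_mem_keys, h ▸ hk]), h]

theorem pv_nodup_keys_insFold (g : String → String) (fs : List String)
    (d : PySem.Dict String String) (h : d.keys.Nodup) : (pvInsFold g fs d).keys.Nodup := by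
  induction fs generalizing d with
  | nil => exact h
  | cons f rest ih => exact ih _ (PySem.Dict.nodup_keys_insert _ _ _ h)

theorem pv_mem_keys_insFold (g : String → String) (fs : List String)
    (d : PySem.Dict String String) (k : String) (h : k ∈ d.keys ∨ k ∈ fs) :
    k ∈ (pvInsFold g fs d).keys := by
  induction fs generalizing d with
  | nil => simpa using h
  | cons f rest ih =>
    apply ih
    rcases h with h | h
    · exact Or.inl ((PySem.Dict.mem_keys_insert _ _ _ _).mpr (Or.inr h))
    · rcases List.mem_cons.mp h with h | h
      · exact Or.inl ((PySem.Dict.mem_keys_insert _ _ _ _).mpr (Or.inl h))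
      · exact Or.inr h

theorem pv_keys_insFold_subset (g : String → String) (fs : List String)
    (d : PySem.Dict String String) (k : String) (h : k ∈ (pvInsFold g fs d).keys) :
    k ∈ d.keys ∨ k ∈ fs := by
  induction fs generalizing d with
  | nil => exact Or.inl h
  | cons f rest ih =>
    rcases ih _ h with h' | h'
    · rcases (PySem.Dict.mem_keys_insert _ _ _ _).mp h' with h'' | h''
      · exact Or.inr (h'' ▸ List.mem_cons_self)
      · exact Or.inl h''
    · exact Or.inr (List.mem_cons_of_mem _ h')

theorem pv_getD_insFold (g : String → String) (fs : List String)
    (d : PySem.Dict String String) (k : String) :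
    (pvInsFold g fs d).getD k "" = if k ∈ fs then g k else d.getD k "" := by
  induction fs generalizing d with
  | nil => simp [pvInsFold]
  | cons f rest ih =>
    show (pvInsFold g rest (d.insert f (g f))).getD k "" = _
    rw [ih]
    by_cases hr : k ∈ rest
    · simp [hr]
    · rw [if_neg hr, PySem.Dict.getD_insert]
      by_cases hf : k = f
      · simp [hf]
      · simp [hf, hr]

-- an ordered dict is its key list paired with its values
theorem pv_items_eq_keys_map (d : PySem.Dict String String) (h : d.keys.Nodup) :
    d.items = d.keys.map (fun k => (k, d.getD k "")) := by
  show d.items = (d.items.map Prod.fst).map (fun k => (k, d.getD k ""))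
  rw [List.map_map]
  conv_lhs => rw [show d.items = d.items.map id from (List.map_id _).symm]
  apply List.map_congr_left
  intro p hp
  have : d.getD p.1 "" = p.2 := PySem.Dict.getD_of_mem_items d (by exact hp) h ""
  simp [Function.comp, this]

-- painting: a list of (condition, value) sweeps, lowest priority first
def pvPaint (rs : List ((String → Bool) × (String → String))) (fs : List String)
    (d : PySem.Dict String String) : PySem.Dict String String :=
  rs.foldl (fun d r => pvPass r.1 r.2 fs d) d

-- the value the sweeps leave for key k: the LAST matching rule (scanned here from the end)
def pvRuleVal : List ((String → Bool) × (String → String)) → String → Option String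
  | [], _ => none
  | r :: rest, k =>
    match pvRuleVal rest k with
    | some v => some v
    | none => if r.1 k then some (r.2 k) else none

theorem pv_keys_pass (c : String → Bool) (v : String → String) (fs : List String)
    (d : PySem.Dict String String) (h : ∀ f ∈ fs, f ∈ d.keys) :
    (pvPass c v fs d).keys = d.keys := by
  induction fs generalizing d with
  | nil => rfl
  | cons f rest ih =>
    show (pvPass c v rest (if c f then d.insert f (v f) else d)).keys = d.keys
    by_cases hc : c f
    · have hk : (d.insert f (v f)).keys = d.keys :=
        PySem.Dict.keys_insert_of_contains _ _
          (by simp [PySem.Dict.contains_eq_decide_mem_keys, h f List.mem_cons_self])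
      rw [if_pos hc, ih _ (fun x hx => hk ▸ h x (List.mem_cons_of_mem _ hx)), hk]
    · rw [if_neg hc, ih _ (fun x hx => h x (List.mem_cons_of_mem _ hx))]

theorem pv_getD_pass (c : String → Bool) (v : String → String) (fs : List String)
    (d : PySem.Dict String String) (k : String) :
    (pvPass c v fs d).getD k "" =
      if k ∈ fs ∧ c k then v k else d.getD k "" := by
  induction fs generalizing d with
  | nil => simp [pvPass]
  | cons f rest ih =>
    show (pvPass c v rest (if c f then d.insert f (v f) else d)).getD k "" = _
    rw [ih]
    by_cases hr : k ∈ rest ∧ c k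
    · simp [hr.1, hr.2]
    · rw [if_neg hr]
      by_cases hf : k = f
      · subst hf
        by_cases hc : c k
        · simp [hc]
        · simp [hc]
      · by_cases hc : c f
        · rw [if_pos hc, PySem.Dict.getD_insert, if_neg hf]
          have : ¬ (k ∈ f :: rest ∧ c k = true) := by
            rintro ⟨hm, hck⟩
            rcases List.mem_cons.mp hm with h | h
            · exact hf h
            · exact hr ⟨h, hck⟩
          rw [if_neg this]
        · rw [if_neg hc]
          have : ¬ (k ∈ f :: rest ∧ c k = true) := by
            rintro ⟨hm, hck⟩
            rcases List.mem_cons.mp hm with h | h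
            · exact absurd (h ▸ hck) hc
            · exact hr ⟨h, hck⟩
          rw [if_neg this]

theorem pv_keys_paint (rs : List ((String → Bool) × (String → String))) (fs : List String)
    (d : PySem.Dict String String) (h : ∀ f ∈ fs, f ∈ d.keys) :
    (pvPaint rs fs d).keys = d.keys := by
  induction rs generalizing d with
  | nil => rfl
  | cons r rest ih =>
    show (pvPaint rest fs (pvPass r.1 r.2 fs d)).keys = d.keys
    have hk := pv_keys_pass r.1 r.2 fs d h
    rw [ih _ (fun x hx => hk ▸ h x hx), hk]

theorem pv_getD_paint (rs : List ((String → Bool) × (String → String))) (fs : List String)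
    (d : PySem.Dict String String) (k : String) (hk : k ∈ fs) :
    (pvPaint rs fs d).getD k "" = (pvRuleVal rs k).getD (d.getD k "") := by
  induction rs generalizing d with
  | nil => rfl
  | cons r rest ih =>
    show (pvPaint rest fs (pvPass r.1 r.2 fs d)).getD k "" = _
    rw [ih, pv_getD_pass]
    rcases hv : pvRuleVal rest k with _ | v
    · by_cases hc : r.1 k
      · simp [pvRuleVal, hv, hc, hk]
      · simp [pvRuleVal, hv, hc, hk]
    · simp [pvRuleVal, hv]

-- B's twelve sweeps as one pvPaint list (lowest priority first)
def pvAllRules : List ((String → Bool) × (String → String)) :=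
  [ (fun f => PySem.Str.isIn "risk" (PySem.Str.lower f),
     fun _ => "Combined risk factor based on multiple clinical indicators"),
    (fun f => PySem.Str.isIn "_delta_" f,
     fun f => "Change in " ++ pvBaseParam f ++ " over time"),
    (fun f => PySem.Str.isIn "_slope_" f,
     fun f => "Trend in " ++ pvBaseParam f ++ " - positive slope indicates increasing values") ]
  ++ pvStaticRules.map (fun r => (fun f => r.1.any (fun s => PySem.Str.isIn s f), fun _ => r.2))

def pvGeneric (f : String) : String :=
  "Clinical parameter: " ++ (if PySem.Str.isIn "_" f then pvBaseParam f else f)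

theorem pv_alt_eq_paint (fs : List String) :
    create_clinical_explanations_alt fs =
      (pvPaint pvAllRules fs (pvInsFold pvGeneric fs PySem.Dict.empty)).items := by
  simp only [create_clinical_explanations_alt, pvPaint, pvAllRules, pvStaticRules, pvInsFold,
    pvGeneric, List.map, List.foldl, List.cons_append, List.nil_append]

-- per key: the last matching sweep is exactly A's first matching elif branch
theorem pv_ruleVal_eq (k : String) :
    (pvRuleVal pvAllRules k).getD (pvGeneric k) = pvExplainA k := by
  simp only [pvAllRules, pvStaticRules, List.map_cons, List.map_nil, List.cons_append, List.nil_append]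
  by_cases h1 : PySem.Str.isIn "SystolicBP" k = true
  all_goals simp at h1
  · simp [pvRuleVal, pvExplainA, h1]
  by_cases h2 : PySem.Str.isIn "DiastolicBP" k = true
  all_goals simp at h2
  · simp [pvRuleVal, pvExplainA, h1, h2]
  by_cases h3 : PySem.Str.isIn "HeartRate" k = true
  all_goals simp at h3
  · simp [pvRuleVal, pvExplainA, h1, h2, h3]
  by_cases h4 : PySem.Str.isIn "Glucose" k = true
  all_goals simp at h4
  · simp [pvRuleVal, pvExplainA, h1, h2, h3, h4]
  by_cases h5 : PySem.Str.isIn "Creatinine" k = true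
  all_goals simp at h5
  · simp [pvRuleVal, pvExplainA, h1, h2, h3, h4, h5]
  by_cases h6a : PySem.Str.isIn "ALT" k = true
  all_goals simp at h6a
  · simp [pvRuleVal, pvExplainA, h1, h2, h3, h4, h5, h6a]
  by_cases h6b : PySem.Str.isIn "AST" k = true
  all_goals simp at h6b
  · simp [pvRuleVal, pvExplainA, h1, h2, h3, h4, h5, h6a, h6b]
  by_cases h7 : PySem.Str.isIn "MedicationAdherence" k = true
  all_goals simp at h7
  · simp [pvRuleVal, pvExplainA, h1, h2, h3, h4, h5, h6a, h6b, h7]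
  by_cases h8 : PySem.Str.isIn "WeightBMI" k = true
  all_goals simp at h8
  · simp [pvRuleVal, pvExplainA, h1, h2, h3, h4, h5, h6a, h6b, h7, h8]
  by_cases h9 : PySem.Str.isIn "O2Sat" k = true
  all_goals simp at h9
  · simp [pvRuleVal, pvExplainA, h1, h2, h3, h4, h5, h6a, h6b, h7, h8, h9]
  by_cases h10 : PySem.Str.isIn "_slope_" k = true
  all_goals simp at h10
  · simp [pvRuleVal, pvExplainA, h1, h2, h3, h4, h5, h6a, h6b, h7, h8, h9, h10]
  by_cases h11 : PySem.Str.isIn "_delta_" k = true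
  all_goals simp at h11
  · simp [pvRuleVal, pvExplainA, h1, h2, h3, h4, h5, h6a, h6b, h7, h8, h9, h10, h11]
  by_cases h12 : PySem.Str.isIn "risk" (PySem.Str.lower k) = true
  all_goals simp at h12
  · simp [pvRuleVal, pvExplainA, h1, h2, h3, h4, h5, h6a, h6b, h7, h8, h9, h10, h11, h12]
  simp [pvRuleVal, pvExplainA, pvGeneric, h1, h2, h3, h4, h5, h6a, h6b, h7, h8, h9, h10, h11, h12]

-- ===== VERDICT (by name: the statement is the Claim_ definition above) =====
theorem create_clinical_explanations_spec : Claim_equal_create_clinical_explanations := by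
  intro fs _
  unfold Spec_create_clinical_explanations
  rw [pv_alt_eq_paint]
  have hA : create_clinical_explanations fs = (pvInsFold pvExplainA fs PySem.Dict.empty).items := rfl
  set dA := pvInsFold pvExplainA fs PySem.Dict.empty with hdA
  set d0 := pvInsFold pvGeneric fs PySem.Dict.empty with hd0
  have hmem : ∀ f ∈ fs, f ∈ d0.keys := fun f hf => pv_mem_keys_insFold _ _ _ _ (Or.inr hf)
  have hkeys0 : dA.keys = d0.keys := pv_keys_insFold_congr _ _ _ _ _ rfl
  have hnodA : dA.keys.Nodup := pv_nodup_keys_insFold _ _ _ (by simp [PySem.Dict.keys_empty])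
  have hnod0 : d0.keys.Nodup := pv_nodup_keys_insFold _ _ _ (by simp [PySem.Dict.keys_empty])
  have hkeysP : (pvPaint pvAllRules fs d0).keys = d0.keys := pv_keys_paint _ _ _ hmem
  rw [hA, pv_items_eq_keys_map dA hnodA,
    pv_items_eq_keys_map (pvPaint pvAllRules fs d0) (hkeysP ▸ hnod0), hkeysP, hkeys0]
  apply List.map_congr_left
  intro k hk
  have hkfs : k ∈ fs := by
    rcases pv_keys_insFold_subset _ _ _ _ (hkeys0 ▸ hk) with h | h
    · simp [PySem.Dict.keys_empty] at h
    · exact h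
  rw [pv_getD_paint _ _ _ _ hkfs, pv_getD_insFold, pv_getD_insFold, if_pos hkfs, if_pos hkfs,
    pv_ruleVal_eq]
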